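-- pv_equiv track=rewrite | github.com/alenaks/SigmaPie | local_helper.py | start_end_clean
-- ===== SOURCE A (Python) =====
-- def start_end_clean(seq):
--     """ Auxiliary function for the tier sequence generator """
--
--     # Start symbols exceptions:
--     # -- nothing in-between two start symbols (i.e., '>a>')
--     # -- nothing before a start symbol (i.e., 'a>')
--     # -- amount of start symbols is less than n (i.e., '>>>')
--     start = [i for i in range(len(seq)) if seq[i] == ">"]
--     if len(start) > 0:
--         s_inter = [i for i in range(start[0], start[-1]) if i not in start]
--         if len(s_inter) > 0:
--             return False
--         elif start[0] != 0:
--             return False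
--         elif len(start) == len(seq):
--             return False
--
--     # End symbols exceptions:
--     # -- nothing in-between two end symbols (i.e., '<a<')
--     # -- nothing after an end symbol (i.e., '<a')
--     # -- amount of end symbols is less than n (i.e., '<<<')
--     end = [i for i in range(len(seq)) if seq[i] == "<"]
--     if len(end) > 0:
--         e_inter = [i for i in range(end[0], end[-1]) if i not in end]
--         if len(e_inter) > 0:
--             return False
--         elif end[-1] != (len(seq)-1):
--             return False
--         elif len(end) == len(seq):
--             return False
--
--     return True
-- ===== SOURCE B (Python) =====
-- def start_end_clean(seq):
--     """ Auxiliary function for the tier sequence generator """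
--     n = len(seq)
--     c = seq.count(">")
--     if c > 0:
--         if seq[:c] != [">"] * c or c == n:
--             return False
--     d = seq.count("<")
--     if d > 0:
--         if seq[n - d:] != ["<"] * d or d == n:
--             return False
--     return True
-- ===== Notes on version B (the rewrite author's own statement) =====
-- stated objective: simpler
-- what changed: A builds the lists of '>' and '<' indices and checks contiguity/anchoring via a range comprehension with membership tests on the index list; B just counts each marker and compares the length-count prefix (resp. suffix) slice against a replicated marker list, with no index lists or membership scans.
import Mathlib
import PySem

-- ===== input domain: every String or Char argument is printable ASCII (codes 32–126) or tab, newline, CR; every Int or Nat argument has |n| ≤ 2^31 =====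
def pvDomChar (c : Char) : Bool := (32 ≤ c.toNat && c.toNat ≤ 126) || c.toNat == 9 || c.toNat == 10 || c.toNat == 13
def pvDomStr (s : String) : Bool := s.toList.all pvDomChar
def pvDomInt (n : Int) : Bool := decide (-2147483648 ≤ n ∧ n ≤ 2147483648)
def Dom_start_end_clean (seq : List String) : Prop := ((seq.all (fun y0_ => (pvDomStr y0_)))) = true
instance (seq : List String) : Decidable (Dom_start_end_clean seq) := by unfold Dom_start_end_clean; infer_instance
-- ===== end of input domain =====

-- B replaces A's index-list-plus-membership scans by count-and-slice checks (all '>' must fill the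
-- length-count prefix, all '<' the length-count suffix); objective: simpler, same exact return value.

-- ===== PORT A =====
-- Literal transliteration of A: index comprehensions over range(len(seq)), membership tests on the
-- index lists; all indices are non-negative, so Nat ranges (List.range / List.range') are exact
-- (range(a,b) = List.range' a (b-a): both empty when b ≤ a; end[-1] ≠ len(seq)-1 is only reached
-- with end nonempty, hence len(seq) ≥ 1, so Nat subtraction is exact there too). A's second block
-- (the '<' checks, reached whenever the start block does not return) is the helper startEndCleanEnd.
def startEndCleanEnd (seq : List String) : Bool :=
  let endl := (List.range seq.length).filter (fun i => seq.getD i "" == "<")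
  if endl.length > 0 then
    let e_inter := (List.range' (endl.headD 0) (endl.getLastD 0 - endl.headD 0)).filter
      (fun i => !(endl.contains i))
    if e_inter.length > 0 then false
    else if endl.getLastD 0 ≠ seq.length - 1 then false
    else if endl.length = seq.length then false
    else true
  else true

def start_end_clean (seq : List String) : Bool :=
  let start := (List.range seq.length).filter (fun i => seq.getD i "" == ">")
  if start.length > 0 then
    let s_inter := (List.range' (start.headD 0) (start.getLastD 0 - start.headD 0)).filter
      (fun i => !(start.contains i))
    if s_inter.length > 0 then false
    else if start.headD 0 ≠ 0 then false
    else if start.length = seq.length then false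
    else startEndCleanEnd seq
  else startEndCleanEnd seq

-- ===== PORT B =====
-- Source B: c = seq.count('>'); reject unless seq[:c] is all '>' and c < n; symmetrically for '<'
-- (seq[:c] → take c, seq[n-d:] → drop (n-d): exact, 0 ≤ c,d ≤ n). Source B's fall-through after the
-- first block (its early returns) is the helper startEndCleanAltEnd.
def startEndCleanAltEnd (seq : List String) : Bool :=
  let n := seq.length
  let d := seq.count "<"
  if d > 0 then
    if seq.drop (n - d) ≠ List.replicate d "<" ∨ d = n then false else true
  else true

def start_end_clean_alt (seq : List String) : Bool :=
  let c := seq.count ">"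
  if c > 0 then
    if seq.take c ≠ List.replicate c ">" ∨ c = seq.length then false
    else startEndCleanAltEnd seq
  else startEndCleanAltEnd seq

-- ===== PRECONDITION & SPEC =====
def Spec_start_end_clean (seq : List String) (out : Bool) : Prop := out = start_end_clean_alt seq
instance (seq : List String) (out : Bool) : Decidable (Spec_start_end_clean seq out) := by unfold Spec_start_end_clean; infer_instance

-- ===== CLAIM (what is proved, stated in full; the proofs are below) =====
def Claim_equal_start_end_clean : Prop := ∀ (seq : List String), Dom_start_end_clean seq → Spec_start_end_clean seq (start_end_clean seq)

-- ===== LEMMAS AND PROOFS =====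

-- count of x in seq = number of indices i with seq.getD i "" = x
theorem pv_count_eq_filter_range (seq : List String) (x : String) :
    seq.count x = ((List.range seq.length).filter (fun i => seq.getD i "" == x)).length := by
  induction seq with
  | nil => simp
  | cons a t ih =>
    simp only [List.length_cons, List.range_succ_eq_map, List.filter_cons, List.filter_map,
      List.getD_cons_zero, List.getD_cons_succ, List.count_cons, Function.comp_def]
    by_cases h : a = x
    · simp [h, ih, Nat.add_comm]
    · simp [h, ih]

-- the index lists A builds are strictly increasing and duplicate-free
theorem pv_pairwise (seq : List String) (x : String) :
    ((List.range seq.length).filter (fun i => seq.getD i "" == x)).Pairwise (· < ·) :=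
  List.Pairwise.sublist List.filter_sublist List.pairwise_lt_range

theorem pv_nodup (seq : List String) (x : String) :
    ((List.range seq.length).filter (fun i => seq.getD i "" == x)).Nodup :=
  List.Nodup.sublist List.filter_sublist List.nodup_range

theorem pv_headD_mem {l : List Nat} (h : l ≠ []) : l.headD 0 ∈ l := by
  cases l with
  | nil => exact absurd rfl h
  | cons a t => exact List.mem_cons_self

theorem pv_getLastD_mem {l : List Nat} (h : l ≠ []) : l.getLastD 0 ∈ l := by
  cases l with
  | nil => exact absurd rfl h
  | cons a t => rw [List.getLastD_cons]; exact List.getLastD_mem_cons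

-- in a strictly increasing list, headD is minimal and getLastD is maximal
theorem pv_headD_le {l : List Nat} (h : l.Pairwise (· < ·)) {y : Nat} (hy : y ∈ l) :
    l.headD 0 ≤ y := by
  cases l with
  | nil => simp at hy
  | cons a t =>
    simp only [List.headD_cons]
    rcases List.mem_cons.mp hy with rfl | hyt
    · exact le_refl _
    · exact le_of_lt (List.rel_of_pairwise_cons h hyt)

theorem pv_getLastD_default (b d d' : Nat) (t : List Nat) :
    (b :: t).getLastD d = (b :: t).getLastD d' := by
  rw [List.getLastD_eq_getLast?, List.getLastD_eq_getLast?,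
    List.getLast?_eq_some_getLast (by simp)]
  rfl

theorem pv_le_getLastD {l : List Nat} (h : l.Pairwise (· < ·)) {y : Nat} (hy : y ∈ l) :
    y ≤ l.getLastD 0 := by
  induction l with
  | nil => simp at hy
  | cons a t ih =>
    cases t with
    | nil => simp at hy; simp [hy]
    | cons b t2 =>
      rw [List.getLastD_cons, pv_getLastD_default b a 0 t2]
      rcases List.mem_cons.mp hy with rfl | hyt
      · exact le_of_lt (List.rel_of_pairwise_cons h (pv_getLastD_mem (by simp)))
      · exact ih (List.Pairwise.of_cons h) hyt

-- CONTIGUITY: A's inner filter is empty iff the index list is exactly the integer interval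
-- from its first to its last element
theorem pv_contig {l : List Nat} (hp : l.Pairwise (· < ·)) (hnd : l.Nodup)
    (hhd : ∀ y ∈ l, l.headD 0 ≤ y) (hlst : ∀ y ∈ l, y ≤ l.getLastD 0)
    (hhm : l.headD 0 ∈ l) (hlm : l.getLastD 0 ∈ l) :
    ((List.range' (l.headD 0) (l.getLastD 0 - l.headD 0)).filter (fun i => !(l.contains i)) = []
      ↔ l = List.range' (l.headD 0) (l.getLastD 0 + 1 - l.headD 0)) := by
  set a := l.headD 0 with ha
  set b := l.getLastD 0 with hb
  have hab : a ≤ b := hlst a hhm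
  rw [List.filter_eq_nil_iff]
  constructor
  · intro h
    have hsub1 : l ⊆ List.range' a (b + 1 - a) := by
      intro y hy
      rw [List.mem_range'_1]
      have := hhd y hy; have := hlst y hy
      omega
    have hsub2 : List.range' a (b + 1 - a) ⊆ l := by
      intro i hi
      rw [List.mem_range'_1] at hi
      by_cases hib : i = b
      · exact hib ▸ hlm
      · have : i ∈ List.range' a (b - a) := by rw [List.mem_range'_1]; omega
        have := h i this
        simpa [List.contains_iff_mem] using this
    exact List.Perm.eq_of_pairwise (fun x y _ _ h1 h2 => by omega)
      hp List.pairwise_lt_range'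
      ((List.subperm_of_subset hnd hsub1).antisymm
        (List.subperm_of_subset List.nodup_range' hsub2))
  · intro h i hi
    rw [List.mem_range'_1] at hi
    have : i ∈ l := by rw [h, List.mem_range'_1]; omega
    simp [this]

-- COUNTING (prefix): p holds on all indices below the filter's length iff the filter is range c
theorem pv_prefix_count (p : Nat → Bool) (n : Nat) :
    (∀ i < ((List.range n).filter p).length, p i)
      ↔ (List.range n).filter p = List.range ((List.range n).filter p).length := by
  set l := (List.range n).filter p with hl
  set c := l.length with hc
  have hcn : c ≤ n := by
    have := List.Sublist.length_le (List.filter_sublist (l := List.range n) (p := p))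
    simpa using this
  constructor
  · intro h
    have hsplit : List.range n = List.range c ++ (List.range (n - c)).map (c + ·) := by
      rw [← List.range_add]; congr 1; omega
    have hfc : (List.range c).filter p = List.range c :=
      List.filter_eq_self.mpr (fun a ha => h a (List.mem_range.mp ha))
    have hl2 : l = List.range c ++ ((List.range (n - c)).map (c + ·)).filter p := by
      rw [hl, hsplit, List.filter_append, hfc]
    have hlen : (((List.range (n - c)).map (c + ·)).filter p).length = 0 := by
      have := congrArg List.length hl2
      simp only [List.length_append, List.length_range] at this
      omega
    rw [hl2, List.length_eq_zero_iff.mp hlen, List.append_nil]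
  · intro h i hi
    have : i ∈ l := by rw [h]; exact List.mem_range.mpr hi
    exact List.of_mem_filter this

-- COUNTING (suffix): p holds on the last c indices iff the filter is range' (n-c) c
theorem pv_suffix_count (p : Nat → Bool) (n : Nat) :
    (∀ i, n - ((List.range n).filter p).length ≤ i → i < n → p i)
      ↔ (List.range n).filter p
          = List.range' (n - ((List.range n).filter p).length) ((List.range n).filter p).length := by
  set l := (List.range n).filter p with hl
  set c := l.length with hc
  have hcn : c ≤ n := by
    have := List.Sublist.length_le (List.filter_sublist (l := List.range n) (p := p))
    simpa using this
  constructor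
  · intro h
    have hsplit : List.range n = List.range' 0 (n - c) ++ List.range' (0 + (n - c)) c := by
      rw [List.range'_append_1, ← List.range_eq_range']
      congr 1; omega
    simp only [Nat.zero_add] at hsplit
    have hfc : (List.range' (n - c) c).filter p = List.range' (n - c) c :=
      List.filter_eq_self.mpr (fun a ha => by
        rw [List.mem_range'_1] at ha
        exact h a ha.1 (by omega))
    have hl2 : l = (List.range' 0 (n - c)).filter p ++ List.range' (n - c) c := by
      rw [hl, hsplit, List.filter_append, hfc]
    have hlen : ((List.range' 0 (n - c)).filter p).length = 0 := by
      have := congrArg List.length hl2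
      simp only [List.length_append, List.length_range'] at this
      omega
    rw [hl2, List.length_eq_zero_iff.mp hlen, List.nil_append]
  · intro h i h1 h2
    have : i ∈ l := by rw [h, List.mem_range'_1]; omega
    exact List.of_mem_filter this

-- bridges to B's slices
theorem pv_take_replicate (seq : List String) (x : String) (c : Nat) (hc : c ≤ seq.length) :
    (seq.take c = List.replicate c x ↔ ∀ i < c, seq.getD i "" = x) := by
  constructor
  · intro h i hi
    have hil : i < seq.length := by omega
    rw [List.getD_eq_getElem seq "" hil]
    have h1 : (seq.take c)[i]'(by simp; omega) = seq[i] := List.getElem_take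
    have h2 : (seq.take c)[i]'(by simp; omega) = x := by
      simp only [h]
      exact List.getElem_replicate _
    rw [← h1, h2]
  · intro h
    apply List.ext_getElem
    · simp; omega
    · intro i hi1 hi2
      have hic : i < c := by simpa using hi2
      have hil : i < seq.length := by omega
      rw [List.getElem_take, List.getElem_replicate _]
      have := h i hic
      rwa [List.getD_eq_getElem seq "" hil] at this

theorem pv_drop_replicate (seq : List String) (x : String) (c : Nat) (hc : c ≤ seq.length) :
    (seq.drop (seq.length - c) = List.replicate c x
      ↔ ∀ i, seq.length - c ≤ i → i < seq.length → seq.getD i "" = x) := by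
  constructor
  · intro h i h1 h2
    rw [List.getD_eq_getElem seq "" h2]
    have h3 : seq[i]'h2 = (seq.drop (seq.length - c))[i - (seq.length - c)]'(by simp; omega) := by
      rw [List.getElem_drop]
      congr 1
      omega
    have h4 : (seq.drop (seq.length - c))[i - (seq.length - c)]'(by simp; omega) = x := by
      simp only [h]; exact List.getElem_replicate _
    rw [h3, h4]
  · intro h
    apply List.ext_getElem
    · simp; omega
    · intro i hi1 hi2
      have hib : (seq.length - c) + i < seq.length := by simp at hi1; omega
      rw [List.getElem_drop, List.getElem_replicate _]
      have := h ((seq.length - c) + i) (by omega) hib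
      rwa [List.getD_eq_getElem seq "" hib] at this

-- A's start-block pass condition (inner filter empty and first index 0) is B's prefix check
theorem pv_start_block (seq : List String) (l : List Nat)
    (hl : l = (List.range seq.length).filter (fun i => seq.getD i "" == ">"))
    (hne : l ≠ []) :
    (((List.range' (l.headD 0) (l.getLastD 0 - l.headD 0)).filter (fun i => !(l.contains i)) = []
          ∧ l.headD 0 = 0)
        ↔ seq.take l.length = List.replicate l.length ">") := by
  have hp : l.Pairwise (· < ·) := by rw [hl]; exact pv_pairwise seq ">"
  have hnd : l.Nodup := by rw [hl]; exact pv_nodup seq ">"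
  have hc : l.length ≤ seq.length := by
    have := List.Sublist.length_le (hl ▸ List.filter_sublist (l := List.range seq.length))
    simpa using this
  rw [pv_take_replicate seq ">" l.length hc]
  have hiff : (∀ i < l.length, seq.getD i "" = ">") ↔ l = List.range l.length := by
    rw [show (∀ i < l.length, seq.getD i "" = ">") ↔
        (∀ i < l.length, (fun i => seq.getD i "" == ">") i) by simp,
      hl]
    exact pv_prefix_count _ seq.length
  rw [hiff]
  rw [pv_contig hp hnd (fun y hy => pv_headD_le hp hy) (fun y hy => pv_le_getLastD hp hy)
    (pv_headD_mem hne) (pv_getLastD_mem hne)]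
  constructor
  · rintro ⟨hcontig, hhd0⟩
    have hlen : l.length = l.getLastD 0 + 1 - l.headD 0 := by
      conv_lhs => rw [hcontig]
      simp [List.length_range']
    rw [List.range_eq_range']
    conv_lhs => rw [hcontig]
    congr 1
    omega
  · intro hr
    have hc0 : l.length ≠ 0 := by
      intro h0
      exact hne (List.length_eq_zero_iff.mp h0)
    obtain ⟨c', hc'⟩ : ∃ c', l.length = c' + 1 := ⟨l.length - 1, by omega⟩
    have hhd0 : l.headD 0 = 0 := by
      rw [hr, hc', List.range_succ_eq_map]
      rfl
    have hlst : l.getLastD 0 = c' := by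
      rw [hr, hc', List.range_succ, List.getLastD_concat]
    refine ⟨?_, hhd0⟩
    rw [hhd0, hlst, hr, hc', List.range_eq_range', Nat.sub_zero]

-- A's end-block pass condition (inner filter empty and last index len-1) is B's suffix check
theorem pv_end_block (seq : List String) (l : List Nat)
    (hl : l = (List.range seq.length).filter (fun i => seq.getD i "" == "<"))
    (hne : l ≠ []) :
    (((List.range' (l.headD 0) (l.getLastD 0 - l.headD 0)).filter (fun i => !(l.contains i)) = []
          ∧ l.getLastD 0 = seq.length - 1)
        ↔ seq.drop (seq.length - l.length) = List.replicate l.length "<") := by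
  have hp : l.Pairwise (· < ·) := by rw [hl]; exact pv_pairwise seq "<"
  have hnd : l.Nodup := by rw [hl]; exact pv_nodup seq "<"
  have hc : l.length ≤ seq.length := by
    have := List.Sublist.length_le (hl ▸ List.filter_sublist (l := List.range seq.length))
    simpa using this
  have hnpos : 0 < seq.length := by
    rcases Nat.eq_zero_or_pos seq.length with h0 | h
    · exact absurd (by rw [hl, h0]; rfl) hne
    · exact h
  have hblt : l.getLastD 0 < seq.length := by
    rw [hl]
    exact List.mem_range.mp (List.mem_of_mem_filter (pv_getLastD_mem (hl ▸ hne)))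
  have hab : l.headD 0 ≤ l.getLastD 0 := pv_headD_le hp (pv_getLastD_mem hne)
  rw [pv_drop_replicate seq "<" l.length hc]
  have hiff : (∀ i, seq.length - l.length ≤ i → i < seq.length → seq.getD i "" = "<")
      ↔ l = List.range' (seq.length - l.length) l.length := by
    rw [show (∀ i, seq.length - l.length ≤ i → i < seq.length → seq.getD i "" = "<") ↔
        (∀ i, seq.length - l.length ≤ i → i < seq.length →
          (fun i => seq.getD i "" == "<") i) by simp,
      hl]
    exact pv_suffix_count _ seq.length
  rw [hiff]
  rw [pv_contig hp hnd (fun y hy => pv_headD_le hp hy) (fun y hy => pv_le_getLastD hp hy)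
    (pv_headD_mem hne) (pv_getLastD_mem hne)]
  constructor
  · rintro ⟨hcontig, hbv⟩
    have hlen : l.length = l.getLastD 0 + 1 - l.headD 0 := by
      conv_lhs => rw [hcontig]
      simp [List.length_range']
    conv_lhs => rw [hcontig]
    congr 1 <;> omega
  · intro hr
    have hc0 : l.length ≠ 0 := fun h0 => hne (List.length_eq_zero_iff.mp h0)
    obtain ⟨c', hc'⟩ : ∃ c', l.length = c' + 1 := ⟨l.length - 1, by omega⟩
    have hhdv : l.headD 0 = seq.length - l.length := by
      conv_lhs => rw [hr, hc', List.range'_succ]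
      rw [List.headD_cons, hc']
    have hbv : l.getLastD 0 = seq.length - 1 := by
      conv_lhs => rw [hr, hc', List.range'_1_concat]
      rw [List.getLastD_concat]
      omega
    refine ⟨?_, hbv⟩
    rw [hhdv, hbv]
    conv_lhs => rw [hr]
    congr 1
    omega

-- the two end blocks agree
theorem pv_end_eq (seq : List String) : startEndCleanEnd seq = startEndCleanAltEnd seq := by
  simp only [startEndCleanEnd, startEndCleanAltEnd]
  set l := (List.range seq.length).filter (fun i => seq.getD i "" == "<") with hl
  have hd : seq.count "<" = l.length := pv_count_eq_filter_range seq "<"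
  rw [hd]
  by_cases hl0 : l = []
  · have h0 : ¬(l.length > 0) := by simp [hl0]
    rw [if_neg h0, if_neg h0]
  · have hlpos : l.length > 0 := List.length_pos_iff.mpr hl0
    have hblock := pv_end_block seq l hl hl0
    rw [if_pos hlpos, if_pos hlpos]
    by_cases hT : seq.drop (seq.length - l.length) = List.replicate l.length "<"
    · obtain ⟨hI, hB⟩ := hblock.mpr hT
      have hIlen : ¬(((List.range' (l.headD 0) (l.getLastD 0 - l.headD 0)).filter
          (fun i => !(l.contains i))).length > 0) := by rw [hI]; simp
      rw [if_neg hIlen, if_neg (not_not_intro hB)]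
      by_cases hN : l.length = seq.length
      · rw [if_pos hN, if_pos (Or.inr hN)]
      · rw [if_neg hN, if_neg (by push Not; exact ⟨hT, hN⟩)]
    · rw [if_pos (Or.inl hT)]
      by_cases hI : (List.range' (l.headD 0) (l.getLastD 0 - l.headD 0)).filter
          (fun i => !(l.contains i)) = []
      · have hB : l.getLastD 0 ≠ seq.length - 1 := fun hB => hT (hblock.mp ⟨hI, hB⟩)
        rw [if_neg (by rw [hI]; simp : ¬(((List.range' (l.headD 0) (l.getLastD 0 - l.headD 0)).filter
            (fun i => !(l.contains i))).length > 0)), if_pos hB]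
      · rw [if_pos (List.length_pos_iff.mpr hI)]

theorem pv_main (seq : List String) : start_end_clean seq = start_end_clean_alt seq := by
  simp only [start_end_clean, start_end_clean_alt]
  set l := (List.range seq.length).filter (fun i => seq.getD i "" == ">") with hl
  have hc : seq.count ">" = l.length := pv_count_eq_filter_range seq ">"
  rw [hc]
  by_cases hl0 : l = []
  · have h0 : ¬(l.length > 0) := by simp [hl0]
    rw [if_neg h0, if_neg h0]
    exact pv_end_eq seq
  · have hlpos : l.length > 0 := List.length_pos_iff.mpr hl0
    have hblock := pv_start_block seq l hl hl0
    rw [if_pos hlpos, if_pos hlpos]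
    by_cases hT : seq.take l.length = List.replicate l.length ">"
    · obtain ⟨hI, hH⟩ := hblock.mpr hT
      have hIlen : ¬(((List.range' (l.headD 0) (l.getLastD 0 - l.headD 0)).filter
          (fun i => !(l.contains i))).length > 0) := by rw [hI]; simp
      rw [if_neg hIlen, if_neg (not_not_intro hH)]
      by_cases hN : l.length = seq.length
      · rw [if_pos hN, if_pos (Or.inr hN)]
      · rw [if_neg hN, if_neg (by push Not; exact ⟨hT, hN⟩)]
        exact pv_end_eq seq
    · rw [if_pos (Or.inl hT)]
      by_cases hI : (List.range' (l.headD 0) (l.getLastD 0 - l.headD 0)).filter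
          (fun i => !(l.contains i)) = []
      · have hH : l.headD 0 ≠ 0 := fun hH => hT (hblock.mp ⟨hI, hH⟩)
        rw [if_neg (by rw [hI]; simp : ¬(((List.range' (l.headD 0) (l.getLastD 0 - l.headD 0)).filter
            (fun i => !(l.contains i))).length > 0)), if_pos hH]
      · rw [if_pos (List.length_pos_iff.mpr hI)]

-- ===== VERDICT (by name: the statement is the Claim_ definition above) =====
theorem start_end_clean_spec : Claim_equal_start_end_clean := by
  intro seq _
  unfold Spec_start_end_clean
  exact pv_main seq
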